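-- pv_equiv track=rewrite | github.com/yeardream-high6/coding_test | 곽치영/프로그래머스/01 해시/04 베스트앨범/programmers42579.py | solution
-- ===== SOURCE A (Python) =====
-- import heapq
--
-- def solution(genres, plays):
--     genre_counters = {}
--
--     for i, (genre, play) in enumerate(zip(genres, plays)):
--         if genre in genre_counters:
--             genre_counters[genre][i] = play
--         else:
--             genre_counters[genre] = {i: play}
--
--     sorted_genre_counters = sorted(genre_counters.items(),
--                                    key=lambda pair: sum(pair[1].values()),
--                                    reverse=True)
--
--     answer = []
--
--     for genre, counter in sorted_genre_counters:
--         tops = heapq.nlargest(2, counter.items(), key=lambda x: (x[1], -x[0]))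
--         answer += [index for index, count in tops]
--
--     return answer
-- ===== SOURCE B (Python) =====
-- def solution(genres, plays):
--     pairs = list(zip(genres, plays))
--     totals = {}
--     order = {}
--     for g, p in pairs:
--         if g not in order:
--             order[g] = len(order)
--         totals[g] = totals.get(g, 0) + p
--     ranked = sorted(enumerate(pairs),
--                     key=lambda t: (-totals[t[1][0]], order[t[1][0]], -t[1][1], t[0]))
--     answer = []
--     taken = {}
--     for i, (g, _) in ranked:
--         c = taken.get(g, 0)
--         if c < 2:
--             answer.append(i)
--             taken[g] = c + 1
--     return answer
-- ===== Notes on version B (the rewrite author's own statement) =====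
-- stated objective: alternative
-- what changed: Replaces A's per-genre dict-of-dicts grouping, stable genre sort by total plays, and per-genre heapq.nlargest(2) with one pass computing genre totals and first-appearance ranks, a single global sort of all songs by the composite key (-genre_total, genre_rank, -play, index), and one counting pass taking at most two songs per genre.
import Mathlib
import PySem

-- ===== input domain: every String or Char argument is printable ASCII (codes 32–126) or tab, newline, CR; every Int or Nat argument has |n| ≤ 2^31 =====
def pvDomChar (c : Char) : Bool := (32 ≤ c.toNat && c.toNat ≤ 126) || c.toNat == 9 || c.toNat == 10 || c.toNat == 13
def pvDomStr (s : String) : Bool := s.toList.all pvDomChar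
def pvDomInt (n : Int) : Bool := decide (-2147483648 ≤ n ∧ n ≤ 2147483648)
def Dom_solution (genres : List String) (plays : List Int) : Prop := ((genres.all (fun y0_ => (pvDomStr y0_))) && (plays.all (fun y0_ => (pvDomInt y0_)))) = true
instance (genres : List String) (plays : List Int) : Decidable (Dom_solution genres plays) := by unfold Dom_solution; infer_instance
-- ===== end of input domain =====

-- B replaces A's per-genre dicts + stable genre sort + heapq.nlargest with ONE global sort by the
-- composite key (-genre_total, first-appearance rank, -play, index) and a single counting pass
-- (objective: alternative algorithm, same exact return value).

-- ===== PORT A =====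
-- heapq.nlargest(2, it, key) is ported as its documented equivalent sorted(it, key, reverse=True)[:2];
-- this is exact here since the key (play, -index) is injective (indices are distinct).
def solution (genres : List String) (plays : List Int) : List Int :=
  let E := PySem.List.enumerate (genres.zip plays) 0
  let gc : PySem.Dict String (PySem.Dict Int Int) :=
    E.foldl (fun d t =>
      if d.contains t.2.1 then
        d.insert t.2.1 ((d.getD t.2.1 PySem.Dict.empty).insert t.1 t.2.2)
      else
        d.insert t.2.1 (PySem.Dict.mk [(t.1, t.2.2)])) PySem.Dict.empty
  let sgc := PySem.List.sorted gc.items (fun pair => pair.2.values.sum) true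
  sgc.foldl (fun acc gcpair =>
    acc ++ ((PySem.List.sorted2 gcpair.2.items (fun x => x.2) (fun x => -x.1) true).take 2).map (fun x => x.1)) []

-- ===== PORT B =====
-- the Python tuple key is ported as a lexicographic Lex (Int × Lex (Int × Lex (Int × Int)))
def solution_alt (genres : List String) (plays : List Int) : List Int :=
  let pairs := genres.zip plays
  let st := pairs.foldl (fun (s : PySem.Dict String Int × PySem.Dict String Int) gp =>
      (s.1.insert gp.1 (s.1.getD gp.1 0 + gp.2),
       if s.2.contains gp.1 then s.2 else s.2.insert gp.1 (s.2.size : Int)))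
    (PySem.Dict.empty, PySem.Dict.empty)
  let ranked := PySem.List.sorted (PySem.List.enumerate pairs 0)
      (fun t => toLex (-(st.1.getD t.2.1 0), toLex (st.2.getD t.2.1 0, toLex (-t.2.2, t.1)))) false
  (ranked.foldl (fun (s : List Int × PySem.Dict String Int) t =>
      let c := s.2.getD t.2.1 0
      if c < 2 then (s.1 ++ [t.1], s.2.insert t.2.1 (c + 1)) else s) ([], PySem.Dict.empty)).1

-- ===== PRECONDITION & SPEC =====
def Spec_solution (genres : List String) (plays : List Int) (out : List Int) : Prop := out = solution_alt genres plays
instance (genres : List String) (plays : List Int) (out : List Int) : Decidable (Spec_solution genres plays out) := by unfold Spec_solution; infer_instance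

-- ===== CLAIM (what is proved, stated in full; the proofs are below) =====
def Claim_equal_solution : Prop := ∀ (genres : List String) (plays : List Int), Dom_solution genres plays → Spec_solution genres plays (solution genres plays)

-- ===== LEMMAS AND PROOFS =====

-- Abbreviations for the shared data of the two pipelines (proof-only).
def pvE (L : List (String × Int)) : List (Int × String × Int) := PySem.List.enumerate L 0
def pvGs (L : List (String × Int)) : List String := PySem.List.dedup (L.map Prod.fst)
def pvGrp (L : List (String × Int)) (g : String) : List (Int × String × Int) :=
  (pvE L).filter (fun t => t.2.1 == g)
def pvT (L : List (String × Int)) (g : String) : Int := ((pvGrp L g).map (fun t => t.2.2)).sum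
def pvIdx (L : List (String × Int)) (g : String) : Int := ((pvGs L).idxOf g : Int)
def pvKg (L : List (String × Int)) (g : String) : Lex (Int × Int) := toLex (-(pvT L g), pvIdx L g)
def pvYs (L : List (String × Int)) : List String := PySem.List.sorted (pvGs L) (pvKg L) false
def pvProj (t : Int × String × Int) : Int × Int := (t.1, t.2.2)
def pvBack (g : String) (q : Int × Int) : Int × String × Int := (q.1, (g, q.2))
def pvDesc (L : List (String × Int)) (g : String) : List (Int × Int) :=
  PySem.List.sorted2 ((pvGrp L g).map pvProj) (fun x => x.2) (fun x => -x.1) true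
def pvStepA (d : PySem.Dict String (PySem.Dict Int Int)) (t : Int × String × Int) :
    PySem.Dict String (PySem.Dict Int Int) :=
  d.insert t.2.1 ((d.getD t.2.1 PySem.Dict.empty).insert t.1 t.2.2)
def pvStepB (s : List Int × PySem.Dict String Int) (t : Int × String × Int) :
    List Int × PySem.Dict String Int :=
  let c := s.2.getD t.2.1 0
  if c < 2 then (s.1 ++ [t.1], s.2.insert t.2.1 (c + 1)) else s

-- ---- generic facts about PySem's insertion sort ----

lemma pvInsertBy_perm {α : Type} (before : α → α → Bool) (x : α) (acc : List α) :
    (PySem.List.insertBy before x acc).Perm (x :: acc) := by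
  induction acc with
  | nil => simp [PySem.List.insertBy]
  | cons y ys ih =>
    simp only [PySem.List.insertBy]
    split
    · exact List.Perm.refl _
    · exact (ih.cons y).trans (List.Perm.swap x y ys)

lemma pvInsertBy_pairwise {α : Type} {R : α → α → Prop} (htr : ∀ a b c, R a b → R b c → R a c)
    (before : α → α → Bool) (x : α) (acc : List α)
    (hacc : acc.Pairwise R)
    (h : ∀ y ∈ acc, (before x y = true → R x y) ∧ (before x y = false → R y x)) :
    (PySem.List.insertBy before x acc).Pairwise R := by
  induction acc with
  | nil => simp [PySem.List.insertBy]
  | cons y ys ih =>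
    rcases List.pairwise_cons.1 hacc with ⟨hy, hys⟩
    simp only [PySem.List.insertBy]
    split
    · rename_i hb
      have hxy : R x y := (h y (by simp)).1 hb
      refine List.pairwise_cons.2 ⟨?_, hacc⟩
      intro z hz
      rcases hz with _ | hz
      · exact hxy
      · exact htr _ _ _ hxy (hy _ (by assumption))
    · rename_i hb
      have hyx : R y x := (h y (by simp)).2 (by simpa using hb)
      refine List.pairwise_cons.2 ⟨?_, ih hys (fun z hz => h z (by simp [hz]))⟩
      intro z hz
      have : z ∈ x :: ys := (pvInsertBy_perm before x ys).mem_iff.1 hz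
      rcases this with _ | hz'
      · exact hyx
      · exact hy _ (by assumption)

lemma pvFoldl_insertBy_perm {α : Type} (before : α → α → Bool) (xs : List α) :
    ∀ acc : List α,
      (xs.foldl (fun a x => PySem.List.insertBy before x a) acc).Perm (acc ++ xs) := by
  induction xs with
  | nil => intro acc; simp
  | cons x xs ih =>
    intro acc
    simp only [List.foldl_cons]
    refine (ih _).trans ?_
    refine (((pvInsertBy_perm before x acc).append_right xs).trans ?_)
    exact List.perm_middle.symm

lemma pvFoldl_insertBy_pairwise {α : Type} {R Q : α → α → Prop} (htr : ∀ a b c, R a b → R b c → R a c)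
    (before : α → α → Bool)
    (hc : ∀ y x, Q y x → (before x y = true → R x y) ∧ (before x y = false → R y x)) :
    ∀ (xs acc : List α), xs.Pairwise Q → acc.Pairwise R →
      (∀ y ∈ acc, ∀ x ∈ xs, Q y x) →
      (xs.foldl (fun a x => PySem.List.insertBy before x a) acc).Pairwise R := by
  intro xs
  induction xs with
  | nil => intro acc _ h _; simpa using h
  | cons x xs ih =>
    intro acc hxs hacc hq
    rcases List.pairwise_cons.1 hxs with ⟨hx, hxs'⟩
    simp only [List.foldl_cons]
    refine ih _ hxs' ?_ ?_
    · exact pvInsertBy_pairwise htr before x acc hacc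
        (fun y hy => hc y x (hq y hy x (by simp)))
    · intro y hy x' hx'
      have : y ∈ x :: acc := (pvInsertBy_perm before x acc).mem_iff.1 hy
      rcases this with _ | hy'
      · exact hx _ hx'
      · exact hq y (by assumption) x' (by simp [hx'])

-- stability of Python's sorted(..., reverse=True): ties in the key keep a strictly
-- increasing position function in order
lemma pvSorted_rev_stable {α : Type} (key : α → Int) (pos : α → Int) (xs ys : List α)
    (hxs : xs.Pairwise (fun a b => pos a < pos b))
    (hperm : ys.Perm xs)
    (hys : ys.Pairwise (fun a b => key b < key a ∨ (key a = key b ∧ pos a < pos b))) :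
    PySem.List.sorted xs key true = ys := by
  have hdef : PySem.List.sorted xs key true =
      xs.foldl (fun acc x => PySem.List.insertBy (fun a b => decide (key b < key a)) x acc) [] := rfl
  set R : α → α → Prop := fun a b => key b < key a ∨ (key a = key b ∧ pos a < pos b) with hR
  have htr : ∀ a b c, R a b → R b c → R a c := by
    intro a b c h1 h2
    rcases h1 with h1 | ⟨h1, h1'⟩ <;> rcases h2 with h2 | ⟨h2, h2'⟩ <;>
      simp only [hR] <;> omega
  have hpw : (xs.foldl (fun acc x => PySem.List.insertBy (fun a b => decide (key b < key a)) x acc) []).Pairwise R := by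
    refine pvFoldl_insertBy_pairwise htr _ ?_ xs [] hxs (by simp) (by simp)
    intro y x hq
    constructor
    · intro hb
      left; exact of_decide_eq_true hb
    · intro hb
      have : ¬ key y < key x := of_decide_eq_false hb
      simp only [hR]; omega
  have hpm : (xs.foldl (fun acc x => PySem.List.insertBy (fun a b => decide (key b < key a)) x acc) []).Perm ys := by
    refine ((pvFoldl_insertBy_perm _ xs []).trans ?_)
    simpa using hperm.symm
  rw [hdef]
  refine List.Perm.eq_of_pairwise ?_ hpw hys hpm
  intro a b _ _ h1 h2
  exfalso
  rcases h1 with h1 | ⟨h1, h1'⟩ <;> rcases h2 with h2 | ⟨h2, h2'⟩ <;> omega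

lemma pvSorted2_rev_props {α : Type} (k1 k2 : α → Int) (xs : List α)
    (hxs : xs.Pairwise (fun a b => k2 b < k2 a)) :
    (PySem.List.sorted2 xs k1 k2 true).Perm xs ∧
      (PySem.List.sorted2 xs k1 k2 true).Pairwise
        (fun a b => k1 b < k1 a ∨ (k1 a = k1 b ∧ k2 b < k2 a)) := by
  have hdef : PySem.List.sorted2 xs k1 k2 true =
      xs.foldl (fun acc x => PySem.List.insertBy
        (fun a b => decide (k1 b < k1 a) || (!decide (k1 a < k1 b) && decide (k2 b < k2 a))) x acc) [] := rfl
  set R : α → α → Prop := fun a b => k1 b < k1 a ∨ (k1 a = k1 b ∧ k2 b < k2 a) with hR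
  have htr : ∀ a b c, R a b → R b c → R a c := by
    intro a b c h1 h2
    rcases h1 with h1 | ⟨h1, h1'⟩ <;> rcases h2 with h2 | ⟨h2, h2'⟩ <;>
      simp only [hR] <;> omega
  constructor
  · rw [hdef]; simpa using pvFoldl_insertBy_perm _ xs []
  · rw [hdef]
    refine pvFoldl_insertBy_pairwise htr _ ?_ xs [] hxs (by simp) (by simp)
    intro y x hq
    constructor
    · intro hb
      rcases Bool.or_eq_true_iff.1 hb with hb | hb
      · left; exact of_decide_eq_true hb
      · rcases Bool.and_eq_true_iff.1 hb with ⟨hb1, hb2⟩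
        have h1 : ¬ k1 x < k1 y := of_decide_eq_false (by simpa using hb1)
        have h2 : k2 y < k2 x := of_decide_eq_true hb2
        simp only [hR]; omega
    · intro hb
      have hb' := Bool.or_eq_false_iff.1 hb
      have h1 : ¬ k1 y < k1 x := of_decide_eq_false hb'.1
      have h2 := Bool.and_eq_false_iff.1 hb'.2
      simp only [hR]
      rcases h2 with h2 | h2
      · have : k1 x < k1 y := of_decide_eq_true (by simpa using h2)
        omega
      · have : ¬ k2 y < k2 x := of_decide_eq_false h2
        omega

-- ---- generic list facts ----

lemma pvNodup_pairwise_idxOf (l : List String) (h : l.Nodup) :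
    l.Pairwise (fun a b => l.idxOf a < l.idxOf b) := by
  induction l with
  | nil => simp
  | cons x t ih =>
    rcases List.nodup_cons.1 h with ⟨hx, ht⟩
    refine List.pairwise_cons.2 ⟨?_, ?_⟩
    · intro b hb
      have hbx : b ≠ x := fun e => hx (e ▸ hb)
      rw [List.idxOf_cons_self]
      rw [List.idxOf_cons_ne _ (by simpa using hbx.symm)]
      omega
    · refine (ih ht).imp_of_mem ?_
      intro a b ha hb hab
      have hax : a ≠ x := fun e => hx (e ▸ ha)
      have hbx : b ≠ x := fun e => hx (e ▸ hb)
      rw [List.idxOf_cons_ne _ (by simpa using hax.symm), List.idxOf_cons_ne _ (by simpa using hbx.symm)]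
      omega

lemma pvFlatMap_congr_mem {σ α : Type} (l : List σ) (f h : σ → List α)
    (hfh : ∀ s ∈ l, f s = h s) : l.flatMap f = l.flatMap h := by
  induction l with
  | nil => rfl
  | cons x t ih =>
    simp only [List.flatMap_cons]
    rw [hfh x (by simp), ih (fun s hs => hfh s (by simp [hs]))]

lemma pvFlatMap_perm_congr {σ α : Type} (l : List σ) (f h : σ → List α)
    (hfh : ∀ s ∈ l, (f s).Perm (h s)) : (l.flatMap f).Perm (l.flatMap h) := by
  induction l with
  | nil => simp
  | cons x t ih =>
    simp only [List.flatMap_cons]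
    exact (hfh x (by simp)).append (ih (fun s hs => hfh s (by simp [hs])))

lemma pvPairwise_flatMap {σ α : Type} (l : List σ) (f : σ → List α) (R : α → α → Prop)
    (hin : ∀ s ∈ l, (f s).Pairwise R)
    (hcross : l.Pairwise (fun s s' => ∀ a ∈ f s, ∀ b ∈ f s', R a b)) :
    (l.flatMap f).Pairwise R := by
  induction l with
  | nil => simp
  | cons x t ih =>
    rcases List.pairwise_cons.1 hcross with ⟨hx, ht⟩
    simp only [List.flatMap_cons]
    refine List.pairwise_append.2 ⟨hin x (by simp), ih (fun s hs => hin s (by simp [hs])) ht, ?_⟩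
    intro a ha b hb
    rcases List.mem_flatMap.1 hb with ⟨s, hs, hbs⟩
    exact hx s hs a ha b hbs

lemma pvPartition_perm (gs : List String) (l : List (Int × String × Int))
    (hnd : gs.Nodup) (hall : ∀ t ∈ l, t.2.1 ∈ gs) :
    (gs.flatMap (fun g => l.filter (fun t => t.2.1 == g))).Perm l := by
  induction gs generalizing l with
  | nil =>
    cases l with
    | nil => simp
    | cons t ts => exact absurd (hall t (by simp)) (by simp)
  | cons g gs ih =>
    rcases List.nodup_cons.1 hnd with ⟨hg, hgs⟩
    simp only [List.flatMap_cons]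
    have hrw : gs.flatMap (fun g' => l.filter (fun t => t.2.1 == g'))
        = gs.flatMap (fun g' => (l.filter (fun t => !(t.2.1 == g))).filter (fun t => t.2.1 == g')) := by
      refine pvFlatMap_congr_mem _ _ _ ?_
      intro g' hg'
      rw [List.filter_filter]
      refine (List.filter_congr ?_)
      intro t _
      by_cases h : t.2.1 = g'
      · have : t.2.1 ≠ g := by
          intro e
          rw [h] at e
          rw [e] at hg'
          exact hg hg'
        rw [h]
        have hne : (g' == g) = false := beq_eq_false_iff_ne.2 (fun e => this (by rw [h, e]))
        simp [hne]
      · simp [h]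
    rw [hrw]
    have hperm := ih (l.filter (fun t => !(t.2.1 == g))) hgs ?_
    · exact ((List.Perm.append_left _ hperm).trans (List.filter_append_perm _ l))
    · intro t ht
      rcases List.mem_filter.1 ht with ⟨htl, hne⟩
      have hne' : t.2.1 ≠ g := by simpa using hne
      rcases List.mem_cons.1 (hall t htl) with e | h
      · exact absurd e hne'
      · exact h

lemma pvEnum_filter_map {α β : Type} (q : α → Bool) (f : α → β) (l : List α) :
    ∀ s : Int, ((PySem.List.enumerate l s).filter (fun t => q t.2)).map (fun t => f t.2)
      = (l.filter q).map f := by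
  induction l with
  | nil => intro s; simp [PySem.List.enumerate]
  | cons x t ih =>
    intro s
    rw [PySem.List.enumerate_cons, List.filter_cons, List.filter_cons]
    by_cases hq : q x
    · simp only [hq]
      simp [ih (s+1)]
    · simp only [hq]
      simp [ih (s + 1)]

lemma pvDedup_append_singleton (xs : List String) (a : String) :
    PySem.List.dedup (xs ++ [a]) =
      if a ∈ PySem.List.dedup xs then PySem.List.dedup xs else PySem.List.dedup xs ++ [a] := by
  simp only [PySem.List.dedup, PySem.Set.ofList_eq_foldl, List.foldl_append, List.foldl_cons,
    List.foldl_nil, PySem.Set.add]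
  by_cases h : a ∈ List.foldl PySem.Set.add [] xs
  · simp [h]
  · simp [h]

-- ---- the three dict-building loops ----

lemma pvGcInner (ts : List (Int × String × Int)) :
    ∀ (d : PySem.Dict String (PySem.Dict Int Int)) (g : String),
      (∀ t' ∈ ts, ∀ g', ((d.getD g' PySem.Dict.empty).contains t'.1) = false) →
      (ts.map (fun t => t.1)).Nodup →
      ((ts.foldl pvStepA d).getD g PySem.Dict.empty).items
        = (d.getD g PySem.Dict.empty).items
          ++ (ts.filter (fun t => t.2.1 == g)).map (fun t => (t.1, t.2.2)) := by
  induction ts with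
  | nil => intro d g _ _; simp
  | cons t ts ih =>
    intro d g hfresh hnd
    rw [List.map_cons] at hnd
    rcases List.nodup_cons.1 hnd with ⟨hx, hnd'⟩
    have hgetD : ∀ g', (pvStepA d t).getD g' PySem.Dict.empty
        = if g' = t.2.1 then (d.getD t.2.1 PySem.Dict.empty).insert t.1 t.2.2
          else d.getD g' PySem.Dict.empty := by
      intro g'; exact PySem.Dict.getD_insert _ _ _ _ _
    have hfresh' : ∀ t' ∈ ts, ∀ g', (((pvStepA d t).getD g' PySem.Dict.empty).contains t'.1) = false := by
      intro t' ht' g'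
      rw [hgetD g']
      split
      · rw [PySem.Dict.contains_insert]
        have h1 : (t'.1 == t.1) = false := beq_eq_false_iff_ne.2 (by
          intro e
          exact hx (List.mem_map.2 ⟨t', ht', e⟩))
        rw [h1, hfresh t' (by simp [ht']) t.2.1]
        rfl
      · exact hfresh t' (by simp [ht']) g'
    simp only [List.foldl_cons]
    rw [ih (pvStepA d t) g hfresh' hnd']
    rw [List.filter_cons]
    by_cases hg : t.2.1 = g
    · have hbeq : (t.2.1 == g) = true := beq_iff_eq.2 hg
      simp only [hbeq, if_pos]
      rw [hgetD g, if_pos hg.symm, hg]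
      rw [PySem.Dict.items_insert_of_not_contains _ _ (hfresh t (by simp) g)]
      simp
    · have hbeq : (t.2.1 == g) = false := beq_eq_false_iff_ne.2 hg
      simp only [hbeq]
      rw [hgetD g, if_neg (fun e => hg e.symm)]
      simp

lemma pvTotals_getD (l : List (String × Int)) :
    ∀ (d : PySem.Dict String Int) (g : String),
      (l.foldl (fun d gp => d.insert gp.1 (d.getD gp.1 0 + gp.2)) d).getD g 0
        = d.getD g 0 + ((l.filter (fun gp => gp.1 == g)).map (fun gp => gp.2)).sum := by
  induction l with
  | nil => intro d g; simp
  | cons gp l ih =>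
    intro d g
    simp only [List.foldl_cons]
    rw [ih, List.filter_cons]
    by_cases hg : gp.1 = g
    · have hbeq : (gp.1 == g) = true := beq_iff_eq.2 hg
      simp only [hbeq, if_pos]
      rw [PySem.Dict.getD_insert, if_pos hg.symm, ← hg]
      simp only [List.map_cons, List.sum_cons]
      ring
    · have hbeq : (gp.1 == g) = false := beq_eq_false_iff_ne.2 hg
      simp only [hbeq]
      rw [PySem.Dict.getD_insert, if_neg (fun e => hg e.symm)]
      simp

lemma pvOrder_spec (l : List (String × Int)) :
    (l.foldl (fun (d : PySem.Dict String Int) gp =>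
        if d.contains gp.1 then d else d.insert gp.1 (d.size : Int)) PySem.Dict.empty).keys
      = PySem.List.dedup (l.map Prod.fst)
    ∧ ∀ g ∈ PySem.List.dedup (l.map Prod.fst),
        (l.foldl (fun (d : PySem.Dict String Int) gp =>
          if d.contains gp.1 then d else d.insert gp.1 (d.size : Int)) PySem.Dict.empty).getD g 0
        = ((PySem.List.dedup (l.map Prod.fst)).idxOf g : Int) := by
  induction l using List.reverseRecOn with
  | nil => simp [PySem.Dict.keys_empty, PySem.List.dedup, PySem.Set.ofList_eq_foldl]
  | append_singleton l x ih =>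
    rcases ih with ⟨ihk, ihg⟩
    rw [List.foldl_append, List.foldl_cons, List.foldl_nil]
    set D := l.foldl (fun (d : PySem.Dict String Int) gp =>
        if d.contains gp.1 then d else d.insert gp.1 (d.size : Int)) PySem.Dict.empty with hD
    have hded : PySem.List.dedup ((l ++ [x]).map Prod.fst)
        = if x.1 ∈ PySem.List.dedup (l.map Prod.fst) then PySem.List.dedup (l.map Prod.fst)
          else PySem.List.dedup (l.map Prod.fst) ++ [x.1] := by
      rw [List.map_append]
      exact pvDedup_append_singleton _ _
    by_cases hmem : x.1 ∈ PySem.List.dedup (l.map Prod.fst)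
    · have hc : D.contains x.1 = true := (PySem.Dict.contains_iff_mem_keys _ _).2 (by rw [ihk]; exact hmem)
      rw [hc, if_pos rfl] -- if (true = true)
      rw [hded, if_pos hmem]
      exact ⟨ihk, ihg⟩
    · have hc : D.contains x.1 = false := by
        rcases Bool.eq_false_or_eq_true (D.contains x.1) with h | h
        · exact absurd ((PySem.Dict.contains_iff_mem_keys _ _).1 h) (by rw [ihk]; exact hmem)
        · exact h
      rw [hc]
      simp only [Bool.false_eq_true, if_false]
      rw [hded, if_neg hmem]
      have hkeys' : (D.insert x.1 (D.size : Int)).keys = PySem.List.dedup (l.map Prod.fst) ++ [x.1] := by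
        rw [PySem.Dict.keys_insert_of_not_contains _ _ hc, ihk]
      refine ⟨hkeys', ?_⟩
      intro g hg
      have hsize : (D.size : Int) = ((PySem.List.dedup (l.map Prod.fst)).length : Int) := by
        have : D.keys.length = D.size := by
          simp [PySem.Dict.keys, PySem.Dict.size]
        rw [← ihk, this]
      rcases List.mem_append.1 hg with hgl | hgx
      · have hne : g ≠ x.1 := fun e => hmem (e ▸ hgl)
        rw [PySem.Dict.getD_insert_of_ne _ _ _ hne, ihg g hgl]
        rw [List.idxOf_append, if_pos hgl]
      · have hgx : g = x.1 := by simpa using hgx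
        subst hgx
        rw [PySem.Dict.getD_insert_self, hsize]
        rw [List.idxOf_append, if_neg hmem, List.idxOf_cons_self]
        simp

-- ---- the counting pass ----

lemma pvCount_sat (g : String) (L2 : List (Int × String × Int))
    (hall : ∀ t ∈ L2, t.2.1 = g) :
    ∀ (acc : List Int) (d : PySem.Dict String Int), d.getD g 0 = 2 →
      L2.foldl pvStepB (acc, d) = (acc, d) := by
  induction L2 with
  | nil => intro acc d _; rfl
  | cons t ts ih =>
    intro acc d hd
    have hg : t.2.1 = g := hall t (by simp)
    have : pvStepB (acc, d) t = (acc, d) := by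
      simp only [pvStepB, hg, hd]
      norm_num
    rw [List.foldl_cons, this]
    exact ih (fun t' ht' => hall t' (by simp [ht'])) acc d hd

lemma pvCount_group (g : String) (L0 : List (Int × String × Int))
    (hall : ∀ t ∈ L0, t.2.1 = g) :
    ∀ (acc : List Int) (d : PySem.Dict String Int), d.getD g 0 = 0 →
      ∃ d', L0.foldl pvStepB (acc, d) = (acc ++ (L0.take 2).map (fun t => t.1), d')
        ∧ ∀ g', g' ≠ g → d'.getD g' 0 = d.getD g' 0 := by
  match L0 with
  | [] => intro acc d _; exact ⟨d, by simp, fun _ _ => rfl⟩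
  | [a] =>
    intro acc d hd
    have hga : a.2.1 = g := hall a (by simp)
    refine ⟨d.insert g 1, ?_, ?_⟩
    · simp only [List.foldl_cons, List.foldl_nil, pvStepB, hga, hd]
      norm_num
    · intro g' hne
      exact PySem.Dict.getD_insert_of_ne _ _ _ hne
  | a :: b :: L2 =>
    intro acc d hd
    have hga : a.2.1 = g := hall a (by simp)
    have hgb : b.2.1 = g := hall b (by simp)
    have h1 : pvStepB (acc, d) a = (acc ++ [a.1], d.insert g 1) := by
      simp only [pvStepB, hga, hd]
      norm_num
    have hd1 : (d.insert g 1).getD g 0 = 1 := PySem.Dict.getD_insert_self _ _ _ _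
    have h2 : pvStepB (acc ++ [a.1], d.insert g 1) b = (acc ++ [a.1] ++ [b.1], (d.insert g 1).insert g 2) := by
      simp only [pvStepB, hgb, hd1]
      norm_num
    have hd2 : ((d.insert g 1).insert g 2).getD g 0 = 2 := PySem.Dict.getD_insert_self _ _ _ _
    refine ⟨(d.insert g 1).insert g 2, ?_, ?_⟩
    · rw [List.foldl_cons, h1, List.foldl_cons, h2,
        pvCount_sat g L2 (fun t ht => hall t (by simp [ht])) _ _ hd2]
      simp
    · intro g' hne
      rw [PySem.Dict.getD_insert_of_ne _ _ _ hne, PySem.Dict.getD_insert_of_ne _ _ _ hne]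

lemma pvCount_fold (gsl : List String) (F : String → List (Int × String × Int))
    (hall : ∀ g ∈ gsl, ∀ t ∈ F g, t.2.1 = g) (hnd : gsl.Nodup) :
    ∀ (acc : List Int) (d : PySem.Dict String Int), (∀ g ∈ gsl, d.getD g 0 = 0) →
      ((gsl.flatMap F).foldl pvStepB (acc, d)).1
        = acc ++ gsl.flatMap (fun g => ((F g).take 2).map (fun t => t.1)) := by
  induction gsl with
  | nil => intro acc d _; simp
  | cons g gsl ih =>
    intro acc d hd
    rcases List.nodup_cons.1 hnd with ⟨hg, hnd'⟩
    simp only [List.flatMap_cons]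
    rw [List.foldl_append]
    rcases pvCount_group g (F g) (hall g (by simp)) acc d (hd g (by simp)) with ⟨d', hfold, hpres⟩
    rw [hfold]
    rw [ih (fun g' hg' t ht => hall g' (by simp [hg']) t ht) hnd' _ d' ?_]
    · simp
    · intro g' hg'
      have hne : g' ≠ g := fun e => hg (e ▸ hg')
      rw [hpres g' hne]
      exact hd g' (by simp [hg'])

-- ---- main equality ----

theorem pvMain_eq (genres : List String) (plays : List Int) :
    solution genres plays = solution_alt genres plays := by
  set L := genres.zip plays with hL
  -- A's grouping step is pvStepA
  have hstepA : (fun (d : PySem.Dict String (PySem.Dict Int Int)) (t : Int × String × Int) =>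
      if d.contains t.2.1 then d.insert t.2.1 ((d.getD t.2.1 PySem.Dict.empty).insert t.1 t.2.2)
      else d.insert t.2.1 (PySem.Dict.mk [(t.1, t.2.2)])) = pvStepA := by
    funext d t
    by_cases h : d.contains t.2.1 = true
    · simp [h, pvStepA]
    · have hF : d.contains t.2.1 = false := by simpa using h
      rw [if_neg (by simp [hF]), pvStepA, PySem.Dict.getD_of_not_contains _ _ hF]
      rfl
  have hsol : solution genres plays =
      (PySem.List.sorted ((pvE L).foldl pvStepA PySem.Dict.empty).items
        (fun pair => pair.2.values.sum) true).foldl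
        (fun acc gcpair => acc ++ ((PySem.List.sorted2 gcpair.2.items
          (fun x => x.2) (fun x => -x.1) true).take 2).map (fun x => x.1)) [] := by
    simp only [solution, pvE]
    rw [hstepA]
  set totalsD := L.foldl (fun (d : PySem.Dict String Int) gp => d.insert gp.1 (d.getD gp.1 0 + gp.2)) PySem.Dict.empty with htotD
  set orderD := L.foldl (fun (d : PySem.Dict String Int) gp => if d.contains gp.1 then d else d.insert gp.1 (d.size : Int)) PySem.Dict.empty with hordD
  have hstB : L.foldl (fun (s : PySem.Dict String Int × PySem.Dict String Int) gp =>
      (s.1.insert gp.1 (s.1.getD gp.1 0 + gp.2),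
       if s.2.contains gp.1 then s.2 else s.2.insert gp.1 (s.2.size : Int)))
      (PySem.Dict.empty, PySem.Dict.empty) = (totalsD, orderD) := by
    exact PySem.List.foldl_prod_mk
      (fun (d : PySem.Dict String Int) gp => d.insert gp.1 (d.getD gp.1 0 + gp.2))
      (fun (d : PySem.Dict String Int) gp => if d.contains gp.1 then d else d.insert gp.1 (d.size : Int))
      L PySem.Dict.empty PySem.Dict.empty
  have halt : solution_alt genres plays =
      ((PySem.List.sorted (pvE L)
        (fun t => toLex (-(totalsD.getD t.2.1 0), toLex (orderD.getD t.2.1 0, toLex (-t.2.2, t.1)))) false).foldl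
        pvStepB ([], PySem.Dict.empty)).1 := by
    simp only [solution_alt, pvE]
    rw [hstB]
    rfl
  -- shared notation
  set E := pvE L with hE
  set Gs := pvGs L with hGs
  set gcA := E.foldl pvStepA PySem.Dict.empty with hgcA
  -- facts about E
  have hEfst : E.map (fun t => t.1) = PySem.List.pyRange 0 (0 + (L.length : Int)) 1 := by
    rw [hE, pvE]
    exact PySem.List.map_fst_enumerate L 0
  have hEnodup : (E.map (fun t => t.1)).Nodup := by
    rw [hEfst]; exact PySem.List.nodup_pyRange_one _ _
  have hEpair : E.Pairwise (fun a b => a.1 < b.1) := by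
    have := PySem.List.pairwise_lt_pyRange_one (a := 0) (b := 0 + (L.length : Int))
    rw [← hEfst] at this
    exact List.pairwise_map.1 this
  have hGenMem : ∀ t ∈ E, t.2.1 ∈ Gs := by
    intro t ht
    have h2 : t.2 ∈ L := by
      have := PySem.List.map_snd_enumerate L 0
      rw [hE, pvE] at ht
      exact this ▸ List.mem_map.2 ⟨t, ht, rfl⟩
    rw [hGs, pvGs]
    exact (PySem.List.mem_dedup _ _).2 (List.mem_map.2 ⟨t.2, h2, rfl⟩)
  have hGsNodup : Gs.Nodup := by rw [hGs, pvGs]; exact PySem.List.nodup_dedup _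
  -- facts about A's grouping dict
  have hfresh0 : ∀ t ∈ E, ∀ g', (((PySem.Dict.empty : PySem.Dict String (PySem.Dict Int Int)).getD g' PySem.Dict.empty).contains t.1) = false := by
    intro t _ g'
    rw [PySem.Dict.getD_empty]
    exact PySem.Dict.contains_empty _
  have hInner : ∀ g, (gcA.getD g PySem.Dict.empty).items = (pvGrp L g).map (fun t => (t.1, t.2.2)) := by
    intro g
    rw [hgcA, pvGcInner E PySem.Dict.empty g hfresh0 hEnodup, PySem.Dict.getD_empty]
    simp [pvGrp, pvE, hE, PySem.Dict.empty]
  have hkeys : gcA.keys = Gs := by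
    rw [hgcA,
      show pvStepA = (fun (d : PySem.Dict String (PySem.Dict Int Int)) (t : Int × String × Int) =>
        d.insert t.2.1 ((d.getD t.2.1 PySem.Dict.empty).insert t.1 t.2.2)) from rfl]
    rw [PySem.Dict.keys_foldl_insert_key E (fun t => t.2.1)
      (fun d t => (d.getD t.2.1 PySem.Dict.empty).insert t.1 t.2.2) PySem.Dict.empty]
    rw [PySem.Dict.keys_empty]
    have hmap : E.map (fun t => t.2.1) = L.map Prod.fst := by
      rw [show (fun (t : Int × String × Int) => t.2.1) = (Prod.fst ∘ fun (t : Int × String × Int) => t.2) from rfl,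
        ← List.map_map, hE, pvE, PySem.List.map_snd_enumerate]
    rw [hmap, hGs, pvGs, PySem.List.dedup, PySem.Set.ofList_eq_foldl]
    rfl
  have hkeysNodup : gcA.keys.Nodup := by
    rw [hgcA,
      show pvStepA = (fun (d : PySem.Dict String (PySem.Dict Int Int)) (t : Int × String × Int) =>
        d.insert t.2.1 ((d.getD t.2.1 PySem.Dict.empty).insert t.1 t.2.2)) from rfl]
    exact PySem.Dict.nodup_keys_foldl_insert_key E (fun t => t.2.1)
      (fun d t => (d.getD t.2.1 PySem.Dict.empty).insert t.1 t.2.2) PySem.Dict.empty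
      (by rw [PySem.Dict.keys_empty]; exact List.nodup_nil)
  have hitems : gcA.items = Gs.map (fun g => (g, gcA.getD g PySem.Dict.empty)) := by
    rw [PySem.Dict.items_eq_map_keys gcA hkeysNodup PySem.Dict.empty, hkeys]
  have hT : ∀ g, ((gcA.getD g PySem.Dict.empty).values).sum = pvT L g := by
    intro g
    simp only [PySem.Dict.values]
    rw [hInner g, List.map_map]
    rfl
  -- genre order list
  set ys := pvYs L with hys
  have hysperm : ys.Perm Gs := by
    rw [hys, pvYs, hGs]
    exact PySem.List.sorted_perm _ _ _
  have hysmem : ∀ g ∈ ys, g ∈ Gs := fun g hg => hysperm.mem_iff.1 hg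
  have hysnodup : ys.Nodup := (hysperm.nodup_iff).2 hGsNodup
  have hKg_inj : ∀ a ∈ Gs, ∀ b ∈ Gs, pvKg L a = pvKg L b → a = b := by
    intro a ha b hb hab
    have h2 : pvIdx L a = pvIdx L b := (congrArg (fun x => (ofLex x).2) hab)
    have h3 : Gs.idxOf a = Gs.idxOf b := by
      simp only [pvIdx, ← hGs] at h2
      exact_mod_cast h2
    have ha' : Gs[Gs.idxOf a]? = some a := by
      rw [List.getElem?_eq_getElem (List.idxOf_lt_length_of_mem ha)]
      exact congrArg some (List.getElem_idxOf _)
    have hb' : Gs[Gs.idxOf b]? = some b := by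
      rw [List.getElem?_eq_getElem (List.idxOf_lt_length_of_mem hb)]
      exact congrArg some (List.getElem_idxOf _)
    rw [h3, hb'] at ha'
    exact (Option.some_injective _ ha').symm
  have hysstrict : ys.Pairwise (fun a b => pvKg L a < pvKg L b) := by
    have h1 : ys.Pairwise (fun a b => pvKg L a ≤ pvKg L b) := by
      rw [hys, pvYs]
      exact PySem.List.sorted_pairwise _ _
    have h2 : ys.Pairwise (fun a b => a ≠ b) := hysnodup
    refine (h1.and h2).imp_of_mem ?_
    intro a b ha hb hab
    refine lt_of_le_of_ne hab.1 ?_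
    intro he
    exact hab.2 (hKg_inj a (hysmem a ha) b (hysmem b hb) he)
  -- B's dicts
  have hTot : ∀ g, totalsD.getD g 0 = pvT L g := by
    intro g
    rw [htotD, pvTotals_getD L PySem.Dict.empty g, PySem.Dict.getD_empty]
    have := pvEnum_filter_map (fun (p : String × Int) => p.1 == g) (fun (p : String × Int) => p.2) L 0
    rw [pvT, pvGrp, pvE]
    simp only at this ⊢
    rw [this]
    omega
  have hOrd : ∀ g ∈ Gs, orderD.getD g 0 = pvIdx L g := by
    intro g hg
    rw [hordD]
    exact (pvOrder_spec L).2 g (by rw [hGs, pvGs] at hg; exact hg)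
  -- A's genre sort is ys (stability)
  have hsgc : PySem.List.sorted gcA.items (fun pair => pair.2.values.sum) true
      = ys.map (fun g => (g, gcA.getD g PySem.Dict.empty)) := by
    refine pvSorted_rev_stable
      (fun (pair : String × PySem.Dict Int Int) => pair.2.values.sum)
      (fun (pair : String × PySem.Dict Int Int) => ((pvGs L).idxOf pair.1 : Int)) _ _ ?_ ?_ ?_
    · rw [hitems]
      refine List.pairwise_map.2 ?_
      refine (pvNodup_pairwise_idxOf Gs hGsNodup).imp ?_
      intro a b h
      rw [← hGs]
      show ((Gs.idxOf a : Int)) < (Gs.idxOf b : Int)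
      exact_mod_cast h
    · rw [hitems]
      exact hysperm.map _
    · refine List.pairwise_map.2 ?_
      refine hysstrict.imp ?_
      intro a b h
      rw [Prod.Lex.lt_iff] at h
      simp only [pvKg, ofLex_toLex] at h
      simp only [hT a, hT b, ← hGs, pvIdx] at *
      rcases h with h | ⟨h1, h2⟩
      · left; omega
      · right; exact ⟨by omega, h2⟩
  -- B's global sort decomposes into per-genre descending blocks, in ys order
  set Bkey := fun (t : Int × String × Int) =>
    toLex (-(totalsD.getD t.2.1 0), toLex (orderD.getD t.2.1 0, toLex (-t.2.2, t.1))) with hBkey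
  have hgrpPair : ∀ g, (pvGrp L g).Pairwise (fun a b => a.1 < b.1) := by
    intro g
    rw [pvGrp, ← hE]
    exact List.Pairwise.sublist List.filter_sublist hEpair
  have hprojPair : ∀ g, ((pvGrp L g).map pvProj).Pairwise
      (fun a b => (fun (x : Int × Int) => -x.1) b < (fun (x : Int × Int) => -x.1) a) := by
    intro g
    refine List.pairwise_map.2 ((hgrpPair g).imp ?_)
    intro a b h
    simp only [pvProj]
    omega
  have hdesc := fun g => pvSorted2_rev_props (fun (x : Int × Int) => x.2)
    (fun (x : Int × Int) => -x.1) ((pvGrp L g).map pvProj) (hprojPair g)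
  have hmemGenre : ∀ g, ∀ t ∈ pvGrp L g, t.2.1 = g := by
    intro g t ht
    rw [pvGrp] at ht
    exact beq_iff_eq.1 (List.mem_filter.1 ht).2
  have hback : ∀ g, ((pvGrp L g).map pvProj).map (pvBack g) = pvGrp L g := by
    intro g
    rw [List.map_map]
    refine (List.map_congr_left ?_).trans (List.map_id _)
    intro t ht
    have := hmemGenre g t ht
    simp only [Function.comp, pvProj, pvBack, id]
    rw [← this]
  have hKback : ∀ g ∈ ys, ∀ q : Int × Int,
      Bkey (pvBack g q) = toLex (-(pvT L g), toLex (pvIdx L g, toLex (-q.2, q.1))) := by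
    intro g hg q
    rw [hBkey]
    simp only [pvBack]
    rw [hTot g, hOrd g (hysmem g hg)]
  have hrankedC : PySem.List.sorted E Bkey false
      = ys.flatMap (fun g => (pvDesc L g).map (pvBack g)) := by
    refine PySem.List.sorted_eq_of_perm_of_pairwise_lt E _ Bkey ?_ ?_
    · -- permutation
      refine (pvFlatMap_perm_congr ys _ (fun g => pvGrp L g) ?_).trans ?_
      · intro g hg
        have h1 := ((hdesc g).1).map (pvBack g)
        simp only [pvDesc] at h1 ⊢
        rw [hback g] at h1
        exact h1
      · refine (hysperm.flatMap_right (fun g => pvGrp L g)).trans ?_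
        have := pvPartition_perm Gs E hGsNodup hGenMem
        simp only [pvGrp, ← hE]
        exact this
    · -- strict pairwise in the composite key
      refine pvPairwise_flatMap ys _ _ ?_ ?_
      · intro g hg
        refine List.pairwise_map.2 (((hdesc g).2).imp_of_mem ?_)
        intro a b ha hb h
        have hlt : toLex (-a.2, a.1) < toLex (-b.2, (b.1 : Int)) := by
          rw [Prod.Lex.lt_iff]
          simp only [ofLex_toLex]
          rcases h with h | ⟨h1, h2⟩
          · left; omega
          · right; exact ⟨by omega, by omega⟩
        rw [hKback g hg a, hKback g hg b, Prod.Lex.lt_iff]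
        right
        refine ⟨rfl, ?_⟩
        rw [Prod.Lex.lt_iff]
        right
        simp only [ofLex_toLex]
        exact ⟨trivial, hlt⟩
      · refine hysstrict.imp_of_mem ?_
        intro g g' hg hg' hlt a ha b hb
        rcases List.mem_map.1 ha with ⟨qa, _, rfl⟩
        rcases List.mem_map.1 hb with ⟨qb, _, rfl⟩
        rw [hKback g hg qa, hKback g' hg' qb, Prod.Lex.lt_iff]
        rw [pvKg, pvKg, Prod.Lex.lt_iff] at hlt
        simp only [ofLex_toLex] at hlt ⊢
        rcases hlt with h | ⟨h1, h2⟩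
        · left; exact h
        · right
          refine ⟨h1, ?_⟩
          rw [Prod.Lex.lt_iff]
          left
          simpa using h2
  -- final assembly
  rw [hsol, hsgc, PySem.List.foldl_append_eq_flatMap, List.nil_append, List.flatMap_map]
  rw [halt, hrankedC]
  rw [pvCount_fold ys (fun g => (pvDesc L g).map (pvBack g)) ?_ hysnodup [] PySem.Dict.empty ?_]
  · rw [List.nil_append]
    refine pvFlatMap_congr_mem ys _ _ ?_
    intro g _
    rw [hInner g, ← List.map_take, List.map_map]
    rfl
  · intro g _ t ht
    rcases List.mem_map.1 ht with ⟨q, _, rfl⟩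
    rfl
  · intro g _
    rw [PySem.Dict.getD_empty]

-- ===== VERDICT (by name: the statement is the Claim_ definition above) =====
theorem solution_spec : Claim_equal_solution := by
  intro genres plays _
  unfold Spec_solution
  exact pvMain_eq genres plays
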